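-- pv_equiv track=rewrite | github.com/Amoonguses1/Leetcode | 2568_minimum_impossible_or.py | minImpossibleOR
-- ===== SOURCE A (Python) =====
-- from typing import List
--
-- def minImpossibleOR(nums: List[int]) -> int:
--     cur = 1
--     numsSet = set()
--     for num in nums:
--         if num & (num-1) == 0:
--             numsSet.add(num)
--     while cur in numsSet:
--         cur <<= 1
--     return cur
-- ===== SOURCE B (Python) =====
-- from typing import List
--
-- def minImpossibleOR(nums: List[int]) -> int:
--     present = 0
--     for num in nums:
--         if num & (num - 1) == 0:
--             present |= num
--     return ~present & (present + 1)
-- ===== Notes on version B (the rewrite author's own statement) =====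
-- stated objective: alternative
-- what changed: Replaces the hash-set of collected powers of two and the probing while-loop by a single bitmask integer OR-accumulated in one pass, with the answer extracted in O(1) by the lowest-clear-bit identity ~present & (present+1) instead of a search loop.
import Mathlib
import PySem

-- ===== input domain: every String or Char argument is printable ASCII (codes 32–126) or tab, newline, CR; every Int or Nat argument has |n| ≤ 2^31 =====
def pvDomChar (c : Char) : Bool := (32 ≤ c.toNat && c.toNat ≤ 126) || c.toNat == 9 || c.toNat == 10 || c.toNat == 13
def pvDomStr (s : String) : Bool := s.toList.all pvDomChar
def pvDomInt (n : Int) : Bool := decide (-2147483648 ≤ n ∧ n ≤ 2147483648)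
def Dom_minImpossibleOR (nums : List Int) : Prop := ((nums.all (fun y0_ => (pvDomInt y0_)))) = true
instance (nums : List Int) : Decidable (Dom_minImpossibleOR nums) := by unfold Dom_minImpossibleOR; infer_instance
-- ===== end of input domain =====

-- B replaces A's set of collected powers of two and its probing while-loop by one OR-accumulated
-- bitmask with a constant-time lowest-clear-bit extraction (alternative algorithm).

-- ===== PORT A =====
-- A's while loop; fuel nums.length + 1 is proved sufficient below (the loop makes at most one
-- step per distinct power of two stored in the set, and the set has at most nums.length elements)
def pvLoopA : Nat → PySem.Set Int → Int → Int
  | 0, _, cur => cur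
  | fuel + 1, s, cur => if PySem.Set.contains s cur then pvLoopA fuel s (cur <<< (1 : Nat)) else cur

def minImpossibleOR (nums : List Int) : Int :=
  let numsSet : PySem.Set Int :=
    nums.foldl (fun s num => if PySem.Int.band num (num - 1) == 0 then PySem.Set.add s num else s)
      PySem.Set.empty
  pvLoopA (nums.length + 1) numsSet 1

-- ===== PORT B =====
def minImpossibleOR_alt (nums : List Int) : Int :=
  let present : Int :=
    nums.foldl (fun p num => if PySem.Int.band num (num - 1) == 0 then PySem.Int.bor p num else p) 0
  PySem.Int.band (Int.not present) (present + 1)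

-- ===== PRECONDITION & SPEC =====
def Spec_minImpossibleOR (nums : List Int) (out : Int) : Prop := out = minImpossibleOR_alt nums
instance (nums : List Int) (out : Int) : Decidable (Spec_minImpossibleOR nums out) := by unfold Spec_minImpossibleOR; infer_instance

-- ===== CLAIM (what is proved, stated in full; the proofs are below) =====
def Claim_equal_minImpossibleOR : Prop := ∀ (nums : List Int), Dom_minImpossibleOR nums → Spec_minImpossibleOR nums (minImpossibleOR nums)

-- ===== LEMMAS AND PROOFS =====

-- a positive n with n &&& (n-1) = 0 is a power of two
theorem pv_nat_pow (n : Nat) (hn : 0 < n) (h : n &&& (n - 1) = 0) : ∃ m : Nat, n = 2 ^ m := by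
  refine ⟨n.log2, ?_⟩
  have hle : 2 ^ n.log2 ≤ n := Nat.log2_self_le (by omega)
  have hlt : n < 2 ^ (n.log2 + 1) := Nat.lt_log2_self
  by_contra hne
  have hgt : 2 ^ n.log2 < n := lt_of_le_of_ne hle (fun e => hne e.symm)
  have hb1 : n.testBit n.log2 = true := by
    rw [Nat.testBit_eq_decide_div_mod_eq]
    have : n / 2 ^ n.log2 = 1 := by
      have h21 : 2 ^ (n.log2 + 1) = 2 ^ n.log2 * 2 := by ring
      apply Nat.div_eq_of_lt_le <;> omega
    simp [this]
  have hb2 : (n - 1).testBit n.log2 = true := by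
    rw [Nat.testBit_eq_decide_div_mod_eq]
    have : (n - 1) / 2 ^ n.log2 = 1 := by
      have h21 : 2 ^ (n.log2 + 1) = 2 ^ n.log2 * 2 := by ring
      apply Nat.div_eq_of_lt_le <;> omega
    simp [this]
  have : (n &&& (n - 1)).testBit n.log2 = true := by
    rw [Nat.testBit_land, hb1, hb2]; rfl
  rw [h, Nat.zero_testBit] at this
  exact Bool.false_ne_true this

-- `num & (num-1) == 0` holds exactly for 0 and the powers of two
theorem pv_cond_pow (num : Int) (h : PySem.Int.band num (num - 1) = 0) :
    num = 0 ∨ ∃ m : Nat, num = (2 : Int) ^ m := by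
  rcases lt_trichotomy num 0 with hneg | hz | hpos
  · exfalso
    unfold PySem.Int.band at h
    rw [if_neg (by omega), if_neg (by omega)] at h
    omega
  · exact Or.inl hz
  · right
    obtain ⟨n, rfl⟩ : ∃ n : Nat, num = (↑(n + 1) : Int) := ⟨(num - 1).toNat, by omega⟩
    have hc : ((↑(n + 1) : Int) - 1) = (↑n : Int) := by push_cast; ring
    rw [hc, PySem.Int.band_natCast] at h
    have hand : (n + 1) &&& n = 0 := by exact_mod_cast h
    have h' : (n + 1) &&& ((n + 1) - 1) = 0 := by simpa using hand
    obtain ⟨m, hm⟩ := pv_nat_pow (n + 1) (by omega) h'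
    exact ⟨m, by rw [hm]; push_cast; ring⟩

-- invariant tying A's set to B's mask: the set is duplicate-free and holds 2^k exactly for the set bits of the mask
def pvInv (s : List Int) (P : Nat) : Prop :=
  s.Nodup ∧ ∀ k : Nat, (P.testBit k = true ↔ ((2 : Int) ^ k) ∈ s)

theorem pv_fold_inv (l : List Int) : ∀ (s : List Int) (P : Nat), pvInv s P →
    ∃ Q : Nat,
      l.foldl (fun p num => if PySem.Int.band num (num - 1) == 0 then PySem.Int.bor p num else p) (↑P) = (↑Q : Int) ∧
      pvInv (l.foldl (fun s num => if PySem.Int.band num (num - 1) == 0 then PySem.Set.add s num else s) s) Q ∧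
      (l.foldl (fun s num => if PySem.Int.band num (num - 1) == 0 then PySem.Set.add s num else s) s).length ≤ s.length + l.length := by
  induction l with
  | nil => intro s P h; exact ⟨P, rfl, h, by simp⟩
  | cons num t ih =>
    intro s P h
    simp only [List.foldl_cons]
    by_cases hc : PySem.Int.band num (num - 1) = 0
    · rw [if_pos (by simpa using hc), if_pos (by simpa using hc)]
      have hlenadd : (PySem.Set.add s num).length ≤ s.length + 1 := by
        simp only [PySem.Set.add]; split <;> simp
      rcases pv_cond_pow num hc with rfl | ⟨m, rfl⟩
      · have hInv' : pvInv (PySem.Set.add s 0) P := by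
          refine ⟨PySem.Set.nodup_add s 0 h.1, fun k => ?_⟩
          rw [PySem.Set.mem_add]
          have hne : ((2 : Int) ^ k) ≠ 0 := by positivity
          rw [h.2 k]
          tauto
        obtain ⟨Q, hB, hI, hL⟩ := ih (PySem.Set.add s 0) P hInv'
        refine ⟨Q, ?_, hI, by simp only [List.length_cons]; omega⟩
        simpa [PySem.Int.bor_zero] using hB
      · have hcast : (2 : Int) ^ m = ((2 ^ m : Nat) : Int) := by push_cast; ring
        have hbor : PySem.Int.bor (↑P) ((2 : Int) ^ m) = ((P ||| 2 ^ m : Nat) : Int) := by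
          rw [hcast, PySem.Int.bor_natCast]
        have hInv' : pvInv (PySem.Set.add s ((2 : Int) ^ m)) (P ||| 2 ^ m) := by
          refine ⟨PySem.Set.nodup_add s _ h.1, fun k => ?_⟩
          rw [PySem.Set.mem_add, Nat.testBit_lor, Nat.testBit_two_pow]
          have hpow : ((2 : Int) ^ k = (2 : Int) ^ m) ↔ k = m := by
            constructor
            · intro he
              have : (2 : Nat) ^ k = 2 ^ m := by exact_mod_cast he
              exact Nat.pow_right_injective (by norm_num) this
            · intro he; rw [he]
          simp only [Bool.or_eq_true, decide_eq_true_eq]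
          rw [h.2 k]
          constructor
          · rintro (hm | he)
            · exact Or.inl hm
            · exact Or.inr (by rw [he])
          · rintro (hm | he)
            · exact Or.inl hm
            · refine Or.inr ?_
              first
              | exact (hpow.mp he).symm
              | exact (hpow.mp he.symm).symm
              | exact hpow.mp he
              | exact hpow.mp he.symm
        obtain ⟨Q, hB, hI, hL⟩ := ih (PySem.Set.add s ((2 : Int) ^ m)) (P ||| 2 ^ m) hInv'
        refine ⟨Q, ?_, hI, by simp only [List.length_cons]; omega⟩
        rw [hbor]
        exact hB
    · rw [if_neg (by simpa using hc), if_neg (by simpa using hc)]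
      obtain ⟨Q, hB, hI, hL⟩ := ih s P h
      exact ⟨Q, hB, hI, by simp only [List.length_cons]; omega⟩

theorem pv_contains_iff (s : PySem.Set Int) (x : Int) : PySem.Set.contains s x = true ↔ x ∈ s := by
  simp [PySem.Set.contains]

-- A's probe loop returns 2^j for j the lowest clear bit of the mask, given enough fuel
theorem pv_loopA (s : List Int) (P j : Nat) (hInv : pvInv s P)
    (hj : P.testBit j = false) (hlow : ∀ i, i < j → P.testBit i = true) :
    ∀ (fuel i : Nat), i ≤ j → j - i < fuel → pvLoopA fuel s ((2 : Int) ^ i) = (2 : Int) ^ j := by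
  intro fuel
  induction fuel with
  | zero => intro i _ h; omega
  | succ f ihf =>
    intro i hij hfuel
    rcases eq_or_lt_of_le hij with rfl | hlt
    · have hnot : ¬ ((2 : Int) ^ i ∈ s) := fun hm => by
        rw [← hInv.2 i] at hm; rw [hj] at hm; exact Bool.false_ne_true hm
      simp only [pvLoopA]
      rw [if_neg (by rw [pv_contains_iff]; exact hnot)]
    · have hmem : (2 : Int) ^ i ∈ s := (hInv.2 i).mp (hlow i hlt)
      simp only [pvLoopA]
      rw [if_pos (by rw [pv_contains_iff]; exact hmem)]
      have hshift : ((2 : Int) ^ i) <<< (1 : Nat) = (2 : Int) ^ (i + 1) := by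
        rw [Int.shiftLeft_eq]; ring
      rw [hshift]
      exact ihf (i + 1) (by omega) (by omega)

-- pigeonhole: if bits 0..j-1 of the mask are set, the set holds j distinct powers, so j ≤ |s|
theorem pv_j_le (s : List Int) (P j : Nat) (hInv : pvInv s P)
    (hlow : ∀ i, i < j → P.testBit i = true) : j ≤ s.length := by
  have hsub : (Finset.range j).image (fun m => (2 : Int) ^ m) ⊆ s.toFinset := by
    intro x hx
    simp only [Finset.mem_image, Finset.mem_range] at hx
    obtain ⟨m, hm, rfl⟩ := hx
    rw [List.mem_toFinset]
    exact (hInv.2 m).mp (hlow m hm)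
  have hinj : Function.Injective (fun m : Nat => (2 : Int) ^ m) := by
    intro a b hab
    simp only at hab
    have : (2 : Nat) ^ a = 2 ^ b := by exact_mod_cast hab
    exact Nat.pow_right_injective (by norm_num) this
  have h1 := Finset.card_le_card hsub
  rw [Finset.card_image_of_injective _ hinj, Finset.card_range,
      List.toFinset_card_of_nodup hInv.1] at h1
  exact h1

-- Python's  ~P & (P+1)  on a nonnegative P, computed through PySem.Int.band's negative branch
theorem pv_band_not (P : Nat) :
    PySem.Int.band (Int.not (↑P)) ((↑P : Int) + 1) = ↑((P + 1) - ((P + 1) &&& P)) := by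
  have h1 : Int.not (↑P) = Int.negSucc P := rfl
  rw [h1]
  unfold PySem.Int.band
  rw [if_neg (by omega : ¬ (0 : Int) ≤ Int.negSucc P), if_pos (by positivity)]
  have h2 : ((↑P : Int) + 1).toNat = P + 1 := by omega
  have h3 : (-(Int.negSucc P) - 1).toNat = P := by
    rw [Int.negSucc_eq]
    omega
  rw [h2, h3]

-- the lowest-clear-bit identity:  (P+1) - ((P+1) & P) = 2^j  for j the lowest clear bit of P
theorem pv_lowclear (P j : Nat) (hj : P.testBit j = false)
    (hlow : ∀ i, i < j → P.testBit i = true) :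
    (P + 1) - ((P + 1) &&& P) = 2 ^ j := by
  have h2j : 0 < 2 ^ j := Nat.two_pow_pos j
  have hmod : P % 2 ^ (j + 1) = 2 ^ j - 1 := by
    apply Nat.eq_of_testBit_eq
    intro i
    rw [Nat.testBit_mod_two_pow, Nat.testBit_two_pow_sub_one]
    rcases lt_trichotomy i j with h | h | h
    · simp [Nat.lt_succ_of_lt h, hlow i h, h]
    · subst h; simp [hj]
    · have h1 : ¬ i < j + 1 := by omega
      have h2 : ¬ i < j := by omega
      simp [h1, h2]
  have hdm := Nat.div_add_mod P (2 ^ (j + 1))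
  set H := P / 2 ^ (j + 1) with hH
  have hP : P = 2 ^ (j + 1) * H + (2 ^ j - 1) := by omega
  have hlt : 2 ^ j < 2 ^ (j + 1) := Nat.pow_lt_pow_right (by norm_num) (Nat.lt_succ_self j)
  have hP1 : P + 1 = 2 ^ (j + 1) * H + 2 ^ j := by omega
  have hand : (P + 1) &&& P = 2 ^ (j + 1) * H := by
    apply Nat.eq_of_testBit_eq
    intro i
    rw [Nat.testBit_land, hP1]
    conv_lhs => rw [hP]
    have hz : (2 ^ (j + 1) * H).testBit i = (2 ^ (j + 1) * H + 0).testBit i := by simp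
    rw [hz, Nat.testBit_two_pow_mul_add H hlt i,
        Nat.testBit_two_pow_mul_add H (by omega) i,
        Nat.testBit_two_pow_mul_add H (Nat.two_pow_pos (j + 1)) i]
    split
    · rename_i hij
      rw [Nat.testBit_two_pow, Nat.testBit_two_pow_sub_one, Nat.zero_testBit]
      rcases Nat.lt_or_ge i j with h | h
      · simp [Nat.ne_of_gt h]
      · simp [not_lt.mpr h]
    · simp
  omega

-- ===== VERDICT (by name: the statement is the Claim_ definition above) =====
theorem minImpossibleOR_spec : Claim_equal_minImpossibleOR := by
  intro nums _
  unfold Spec_minImpossibleOR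
  have hInv0 : pvInv PySem.Set.empty 0 :=
    ⟨List.nodup_nil, fun k => by simp [Nat.zero_testBit, PySem.Set.empty]⟩
  obtain ⟨Q, hB, hInv, hlen⟩ := pv_fold_inv nums PySem.Set.empty 0 hInv0
  rw [Nat.cast_zero] at hB
  have hex : ∃ i, Q.testBit i = false := ⟨Q, Nat.testBit_lt_two_pow Nat.lt_two_pow_self⟩
  have hj : Q.testBit (Nat.find hex) = false := Nat.find_spec hex
  have hlow : ∀ i, i < Nat.find hex → Q.testBit i = true := fun i hi => by
    have := Nat.find_min hex hi; simpa using this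
  have hjle : Nat.find hex ≤ nums.length :=
    le_trans (pv_j_le _ Q (Nat.find hex) hInv hlow) (by simpa [PySem.Set.empty] using hlen)
  have hA : minImpossibleOR nums = (2 : Int) ^ (Nat.find hex) := by
    show pvLoopA (nums.length + 1) _ 1 = _
    have h1 : (1 : Int) = (2 : Int) ^ (0 : Nat) := by norm_num
    rw [h1]
    exact pv_loopA _ Q (Nat.find hex) hInv hj hlow (nums.length + 1) 0 (by omega) (by omega)
  have hBv : minImpossibleOR_alt nums = (2 : Int) ^ (Nat.find hex) := by
    show PySem.Int.band (Int.not _) (_ + 1) = _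
    rw [hB, pv_band_not, pv_lowclear Q (Nat.find hex) hj hlow]
    push_cast
    ring
  rw [hA, hBv]
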